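-- pv_equiv track=rewrite | github.com/stemado/scout-mcp | src/scout/scheduler/linux.py | _remove_entry
-- ===== SOURCE A (Python) =====
-- _MARKER_PREFIX = "# SCOUT:"
--
-- def _remove_entry(crontab: str, name: str) -> str:
--     """Remove a Scout entry (marker + cron line) from crontab text.
--
--     Handles blank lines between the marker and cron expression:
--     skips the marker, any following blank lines, then the next
--     non-blank line (the cron expression).
--     """
--     lines = crontab.split("\n")
--     result = []
--     i = 0
--     while i < len(lines):
--         if lines[i].strip() == f"{_MARKER_PREFIX}{name}":
--             # Skip marker line
--             i += 1
--             # Skip any blank lines between marker and cron expression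
--             while i < len(lines) and not lines[i].strip():
--                 i += 1
--             # Skip the cron expression line itself
--             if i < len(lines):
--                 i += 1
--             continue
--         result.append(lines[i])
--         i += 1
--     return "\n".join(result)
-- ===== SOURCE B (Python) =====
-- # B: find-and-splice — repeatedly search for the next marker line, copy the
-- # untouched prefix over with one slice, and splice past the block (marker,
-- # blanks, one cron line) with index arithmetic; no per-line state machine.
-- _MARKER_PREFIX = "# SCOUT:"
--
-- def _remove_entry(crontab: str, name: str) -> str:
--     marker = _MARKER_PREFIX + name
--     lines = crontab.split("\n")
--     out = []
--     while True:
--         hit = next((i for i, l in enumerate(lines) if l.strip() == marker), None)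
--         if hit is None:
--             out += lines
--             break
--         out += lines[:hit]
--         rest = lines[hit + 1:]
--         j = next((k for k, l in enumerate(rest) if l.strip()), len(rest))
--         lines = rest[j + 1:]
--     return "\n".join(out)
-- ===== Notes on version B (the rewrite author's own statement) =====
-- stated objective: alternative
-- what changed: Replaced A's per-line scan with mutable index and nested blank-skipping while by a find-and-splice loop: search for the next marker line, copy the whole untouched prefix with a slice, compute the end of the block with one index search and continue on the spliced tail.
import Mathlib
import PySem

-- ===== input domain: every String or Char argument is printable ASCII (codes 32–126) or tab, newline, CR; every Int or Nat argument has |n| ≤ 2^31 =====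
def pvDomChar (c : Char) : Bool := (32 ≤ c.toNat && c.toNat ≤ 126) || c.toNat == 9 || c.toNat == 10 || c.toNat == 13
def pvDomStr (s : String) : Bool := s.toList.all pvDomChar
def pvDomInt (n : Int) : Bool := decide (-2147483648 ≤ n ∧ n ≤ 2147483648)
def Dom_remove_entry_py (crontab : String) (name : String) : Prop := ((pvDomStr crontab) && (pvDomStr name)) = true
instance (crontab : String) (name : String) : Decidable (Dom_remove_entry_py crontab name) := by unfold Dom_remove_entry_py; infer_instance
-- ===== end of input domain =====

-- B replaces A's per-line scan (mutable index, nested blank-skipping while) by a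
-- find-and-splice loop: search the next marker line, copy the prefix with a slice,
-- splice past the block and continue (objective: alternative decomposition).

-- ===== PORT A =====
-- inner `while i < len(lines) and not lines[i].strip(): i += 1` (index advance = list consumption)
def pvSkipBlanks : List String → List String
  | [] => []
  | l :: rest => if PySem.Str.strip l == "" then pvSkipBlanks rest else l :: rest

theorem pvSkipBlanks_length_le (xs : List String) : (pvSkipBlanks xs).length ≤ xs.length := by
  induction xs with
  | nil => simp [pvSkipBlanks]
  | cons l rest ih =>
    simp only [pvSkipBlanks]
    split
    · exact Nat.le_succ_of_le ih
    · simp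

-- outer `while i < len(lines)` of A; `if i < len(lines): i += 1` is `.tail`
def pvALoop (marker : String) : List String → List String
  | [] => []
  | l :: rest =>
    if PySem.Str.strip l == marker then
      pvALoop marker (pvSkipBlanks rest).tail
    else
      l :: pvALoop marker rest
termination_by xs => xs.length
decreasing_by
  · have h := pvSkipBlanks_length_le rest
    simp [List.length_tail]; omega
  · simp

def remove_entry_py (crontab : String) (name : String) : String :=
  PySem.Str.join "\n" (pvALoop ("# SCOUT:" ++ name) ((PySem.Str.split? crontab "\n").getD []))

-- ===== PORT B =====
-- B's `while True` find-and-splice loop; `next((i for i,l in enumerate(..) if p l), …)`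
-- is List.findIdx?, the slices lines[:hit] / rest[j+1:] are take / drop.
def pvBLoop (marker : String) (lines : List String) : List String :=
  match hfind : List.findIdx? (fun l => PySem.Str.strip l == marker) lines with
  | none => lines
  | some hit =>
    let rest := lines.drop (hit + 1)
    let j := (List.findIdx? (fun l => !(PySem.Str.strip l == "")) rest).getD rest.length
    lines.take hit ++ pvBLoop marker (rest.drop (j + 1))
termination_by lines.length
decreasing_by
  have hlen : hit < lines.length := (List.findIdx?_eq_some_iff_findIdx_eq.mp hfind).1
  simp only [List.length_drop]
  omega

def remove_entry_py_alt (crontab : String) (name : String) : String :=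
  PySem.Str.join "\n" (pvBLoop ("# SCOUT:" ++ name) ((PySem.Str.split? crontab "\n").getD []))

-- ===== PRECONDITION & SPEC =====
def Spec_remove_entry_py (crontab : String) (name : String) (out : String) : Prop := out = remove_entry_py_alt crontab name
instance (crontab : String) (name : String) (out : String) : Decidable (Spec_remove_entry_py crontab name out) := by unfold Spec_remove_entry_py; infer_instance

-- ===== CLAIM (what is proved, stated in full; the proofs are below) =====
def Claim_equal_remove_entry_py : Prop := ∀ (crontab : String) (name : String), Dom_remove_entry_py crontab name → Spec_remove_entry_py crontab name (remove_entry_py crontab name)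

-- ===== LEMMAS AND PROOFS =====

-- A's blank-skip-then-tail equals B's drop past the first non-blank index
theorem pvSkipBlanks_tail_eq_drop (rest : List String) :
    (pvSkipBlanks rest).tail =
      rest.drop (((List.findIdx? (fun l => !(PySem.Str.strip l == "")) rest).getD rest.length) + 1) := by
  induction rest with
  | nil => simp [pvSkipBlanks]
  | cons l rest ih =>
    by_cases hb : PySem.Str.strip l == ""
    · simp only [pvSkipBlanks, hb, if_pos, List.findIdx?_cons, Bool.not_eq_true']
      simp only [List.length_cons]
      rw [ih]
      cases hf : List.findIdx? (fun l => !(PySem.Str.strip l == "")) rest with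
      | none => simp
      | some k => simp
    · simp [pvSkipBlanks, hb, List.findIdx?_cons]

-- no marker line ⇒ A keeps everything
theorem pvALoop_no_marker (marker : String) (lines : List String)
    (h : List.findIdx? (fun l => PySem.Str.strip l == marker) lines = none) :
    pvALoop marker lines = lines := by
  induction lines with
  | nil => simp [pvALoop]
  | cons l rest ih =>
    rw [List.findIdx?_cons] at h
    by_cases hm : PySem.Str.strip l == marker
    · simp [hm] at h
    · simp only [hm, Bool.false_eq_true, if_false] at h
      simp only [pvALoop, hm, Bool.false_eq_true, if_false]
      rw [ih (by simpa using h)]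

-- marker found at index hit ⇒ A = kept prefix ++ A on the spliced tail
theorem pvALoop_marker (marker : String) (lines : List String) (hit : Nat)
    (h : List.findIdx? (fun l => PySem.Str.strip l == marker) lines = some hit) :
    pvALoop marker lines =
      lines.take hit ++ pvALoop marker (pvSkipBlanks (lines.drop (hit + 1))).tail := by
  induction lines generalizing hit with
  | nil => simp at h
  | cons l rest ih =>
    rw [List.findIdx?_cons] at h
    by_cases hm : PySem.Str.strip l == marker
    · simp only [hm, if_true, Option.some.injEq] at h
      subst h
      simp [pvALoop, hm]
    · simp only [hm, Bool.false_eq_true, if_false] at h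
      cases hf : List.findIdx? (fun l => PySem.Str.strip l == marker) rest with
      | none => simp [hf] at h
      | some k =>
        rw [hf] at h
        simp only [Option.map_some, Option.some.injEq] at h
        subst h
        simp only [pvALoop, hm, Bool.false_eq_true, if_false, List.take_succ_cons,
          List.drop_succ_cons, List.cons_append]
        rw [ih k hf]

-- main agreement, by B's own recursion scheme
theorem pvLoop_agree (marker : String) (lines : List String) :
    pvALoop marker lines = pvBLoop marker lines := by
  induction lines using pvBLoop.induct marker with
  | case1 lines hfind => rw [pvBLoop, hfind, pvALoop_no_marker marker lines hfind]
  | case2 lines hit hfind rest j ih =>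
    rw [pvBLoop, hfind]
    rw [pvALoop_marker marker lines hit hfind, pvSkipBlanks_tail_eq_drop, ih]

-- ===== VERDICT (by name: the statement is the Claim_ definition above) =====
theorem remove_entry_py_spec : Claim_equal_remove_entry_py := by
  intro crontab name _
  unfold Spec_remove_entry_py remove_entry_py remove_entry_py_alt
  rw [pvLoop_agree]
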